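-- pv_equiv track=rewrite | github.com/alinvb/slide_generator | brand_extractor.py | _filter_unique_fonts
-- ===== SOURCE A (Python) =====
-- from typing import Dict, Optional, Tuple, List
--
-- def _filter_unique_fonts(fonts: List[Dict]) -> List[Dict]:
--     """Remove duplicate fonts and keep most relevant ones"""
--     unique_fonts = []
--     seen_names = set()
--
--     # Sort by context priority
--     context_priority = {'title': 1, 'header': 2, 'emphasis': 3, 'body': 4}
--     sorted_fonts = sorted(fonts, key=lambda x: context_priority.get(x.get('context', 'body'), 4))
--
--     for font in sorted_fonts:
--         if font['name'] not in seen_names: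
--             unique_fonts.append(font)
--             seen_names.add(font['name'])
--             if len(unique_fonts) >= 5:  # Limit to top 5 fonts
--                 break
--
--     return unique_fonts
-- ===== SOURCE B (Python) =====
-- from typing import Dict, List
--
-- def _filter_unique_fonts(fonts: List[Dict]) -> List[Dict]:
--     """Remove duplicate fonts and keep most relevant ones (bucket passes, no sort)."""
--     context_priority = {'title': 1, 'header': 2, 'emphasis': 3, 'body': 4}
--     unique_fonts = []
--     seen_names = set()
--     # One pass per priority level reproduces the stable-sort order without sorting.
--     for level in (1, 2, 3, 4):
--         for font in fonts:
--             if context_priority.get(font.get('context', 'body'), 4) != level: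
--                 continue
--             name = font['name']
--             if name not in seen_names:
--                 unique_fonts.append(font)
--                 seen_names.add(name)
--                 if len(unique_fonts) >= 5:
--                     return unique_fonts
--     return unique_fonts
-- ===== Notes on version B (the rewrite author's own statement) =====
-- stated objective: alternative
-- what changed: B drops the sorted() call entirely: since the priority key only takes the four values 1..4, B makes one pass over the original list per priority level (bucket passes), which reproduces the stable-sort order, deduplicating by name and returning as soon as 5 fonts are collected.
import Mathlib
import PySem

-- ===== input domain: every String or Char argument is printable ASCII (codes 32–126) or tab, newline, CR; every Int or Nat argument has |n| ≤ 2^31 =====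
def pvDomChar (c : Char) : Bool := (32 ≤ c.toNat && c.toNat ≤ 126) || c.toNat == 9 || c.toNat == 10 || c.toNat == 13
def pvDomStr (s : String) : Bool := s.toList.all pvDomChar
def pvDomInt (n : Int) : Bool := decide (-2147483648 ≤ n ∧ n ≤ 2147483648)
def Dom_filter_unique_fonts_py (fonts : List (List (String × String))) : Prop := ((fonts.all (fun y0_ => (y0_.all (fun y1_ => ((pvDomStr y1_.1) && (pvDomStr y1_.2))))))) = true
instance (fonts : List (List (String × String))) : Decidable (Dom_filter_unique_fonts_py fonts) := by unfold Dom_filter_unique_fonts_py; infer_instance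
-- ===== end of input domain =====

-- B replaces A's stable sort by four bucket passes over the original list (one per priority level),
-- which reproduces the stable-sort order without sorting; same dedup-by-name and stop-at-5 behaviour.


-- ===== PORT A =====
-- context_priority.get(font.get('context', 'body'), 4) — shared by both sources verbatim
def fontPrio (f : List (String × String)) : Int :=
  ((PySem.Dict.mk [("title", (1 : Int)), ("header", 2), ("emphasis", 3), ("body", 4)]).get?
      (((PySem.Dict.mk f).get? "context").getD "body")).getD 4

-- font['name']; the .getD "" default is never used inside Pre_ (every font carries a 'name' key;
-- in Python a missing key raises KeyError, which Pre_ excludes)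
def fontName (f : List (String × String)) : String :=
  ((PySem.Dict.mk f).get? "name").getD ""

-- A's single loop over the sorted list, with the break at 5
def loopA : List (List (String × String)) → List (List (String × String)) → PySem.Set String →
    List (List (String × String))
  | [], acc, _ => acc
  | f :: rest, acc, seen =>
      if PySem.Set.contains seen (fontName f) then loopA rest acc seen
      else
        let acc' := acc ++ [f]
        if 5 ≤ acc'.length then acc'
        else loopA rest acc' (PySem.Set.add seen (fontName f))

def filter_unique_fonts_py (fonts : List (List (String × String))) : List (List (String × String)) :=
  loopA (PySem.List.sorted fonts (fun x => fontPrio x)) [] PySem.Set.empty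

-- ===== PORT B =====
-- B's inner loop for one priority level; the Bool marks the early 'return unique_fonts'
def loopBLevel (level : Int) : List (List (String × String)) → List (List (String × String)) →
    PySem.Set String → List (List (String × String)) × PySem.Set String × Bool
  | [], acc, seen => (acc, seen, false)
  | f :: rest, acc, seen =>
      if fontPrio f ≠ level then loopBLevel level rest acc seen
      else if PySem.Set.contains seen (fontName f) then loopBLevel level rest acc seen
      else
        let acc' := acc ++ [f]
        let seen' := PySem.Set.add seen (fontName f)
        if 5 ≤ acc'.length then (acc', seen', true)
        else loopBLevel level rest acc' seen'

-- B's outer loop over the four priority levels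
def loopBLevels : List Int → List (List (String × String)) → List (List (String × String)) →
    PySem.Set String → List (List (String × String))
  | [], _, acc, _ => acc
  | l :: ls, fonts, acc, seen =>
      let r := loopBLevel l fonts acc seen
      if r.2.2 then r.1 else loopBLevels ls fonts r.1 r.2.1

def filter_unique_fonts_py_alt (fonts : List (List (String × String))) : List (List (String × String)) :=
  loopBLevels [1, 2, 3, 4] fonts [] PySem.Set.empty

-- ===== PRECONDITION & SPEC =====
-- Pre_ excludes lists containing a font dict without a 'name' key: on those A raises KeyError at the
-- first such font it reaches — except when the 5-font break fires first, in which case A (and B)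
-- still return a value, so Pre_ is slightly narrower than A's returning domain (see claim cites).
def Pre_filter_unique_fonts_py (fonts : List (List (String × String))) : Prop :=
  (fonts.all (fun f => (PySem.Dict.mk f).contains "name")) = true
instance (fonts : List (List (String × String))) : Decidable (Pre_filter_unique_fonts_py fonts) := by
  unfold Pre_filter_unique_fonts_py; infer_instance

def pvWitness_filter_unique_fonts_py : (List (List (String × String))) :=
  [[("name", "Arial"), ("context", "title")], [("name", "Arial"), ("context", "body")],
   [("name", "Times"), ("context", "header")], [("name", "Body")]]

def Spec_filter_unique_fonts_py (fonts : List (List (String × String))) (out : List (List (String × String))) : Prop := out = filter_unique_fonts_py_alt fonts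
instance (fonts : List (List (String × String))) (out : List (List (String × String))) : Decidable (Spec_filter_unique_fonts_py fonts out) := by unfold Spec_filter_unique_fonts_py; infer_instance

-- ===== CLAIM (what is proved, stated in full; the proofs are below) =====
def Claim_equal_filter_unique_fonts_py : Prop := ∀ (fonts : List (List (String × String))), Dom_filter_unique_fonts_py fonts → Pre_filter_unique_fonts_py fonts → Spec_filter_unique_fonts_py fonts (filter_unique_fonts_py fonts)

-- ===== LEMMAS AND PROOFS =====

-- proof-side mirror of loopA that also reports the final seen-set and whether the break fired
def stepA : List (List (String × String)) → List (List (String × String)) → PySem.Set String →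
    List (List (String × String)) × PySem.Set String × Bool
  | [], acc, seen => (acc, seen, false)
  | f :: rest, acc, seen =>
      if PySem.Set.contains seen (fontName f) then stepA rest acc seen
      else
        let acc' := acc ++ [f]
        let seen' := PySem.Set.add seen (fontName f)
        if 5 ≤ acc'.length then (acc', seen', true)
        else stepA rest acc' seen'

lemma loopA_eq_stepA_fst (xs : List (List (String × String))) (acc : List (List (String × String)))
    (seen : PySem.Set String) : loopA xs acc seen = (stepA xs acc seen).1 := by
  induction xs generalizing acc seen with
  | nil => rfl
  | cons f rest ih =>
      simp only [loopA, stepA]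
      split_ifs with h1 h2 <;> simp [ih]

lemma stepA_append (xs ys : List (List (String × String))) (acc : List (List (String × String)))
    (seen : PySem.Set String) :
    stepA (xs ++ ys) acc seen =
      if (stepA xs acc seen).2.2 then stepA xs acc seen
      else stepA ys (stepA xs acc seen).1 (stepA xs acc seen).2.1 := by
  induction xs generalizing acc seen with
  | nil => simp [stepA]
  | cons f rest ih =>
      by_cases h1 : PySem.Set.contains seen (fontName f) = true
      · simp only [List.cons_append, stepA, h1, if_true]
        exact ih acc seen
      · by_cases h2 : 5 ≤ (acc ++ [f]).length
        · simp only [List.cons_append, stepA, h1, Bool.false_eq_true, if_false, if_pos h2]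
          rfl
        · simp only [List.cons_append, stepA, h1, Bool.false_eq_true, if_false, h2]
          exact ih (acc ++ [f]) (PySem.Set.add seen (fontName f))

def bkt (i : Int) (xs : List (List (String × String))) : List (List (String × String)) :=
  xs.filter (fun f => fontPrio f == i)

lemma loopBLevel_eq_stepA_filter (level : Int) (xs : List (List (String × String)))
    (acc : List (List (String × String))) (seen : PySem.Set String) :
    loopBLevel level xs acc seen = stepA (bkt level xs) acc seen := by
  induction xs generalizing acc seen with
  | nil => rfl
  | cons f rest ih =>
      by_cases h : fontPrio f = level
      · simp only [loopBLevel, h, ne_eq, not_true_eq_false, if_false, bkt, List.filter_cons,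
          beq_self_eq_true, if_true, stepA]
        split_ifs with h1 h2
        · exact ih acc seen
        · rfl
        · exact ih (acc ++ [f]) (PySem.Set.add seen (fontName f))
      · have hb : (fontPrio f == level) = false := by simp [h]
        simp only [loopBLevel, h, ne_eq, not_false_eq_true, if_true, bkt, List.filter_cons, hb,
          Bool.false_eq_true, if_false]
        exact ih acc seen

-- the priority key only takes the values 1, 2, 3, 4
lemma fontPrio_cases (f : List (String × String)) :
    fontPrio f = 1 ∨ fontPrio f = 2 ∨ fontPrio f = 3 ∨ fontPrio f = 4 := by
  unfold fontPrio
  simp only [PySem.Dict.get?_mk_cons]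
  split_ifs <;> first | simp | trivial | tauto

-- inserting x after a block of elements it does not go before
lemma insertBy_cons_of_before {α : Type} (before : α → α → Bool) (x y : α) (ys : List α)
    (h : before x y = true) : PySem.List.insertBy before x (y :: ys) = x :: y :: ys := by
  simp [PySem.List.insertBy, h]

lemma insertBy_append_of {α : Type} (before : α → α → Bool) (x : α) (u v : List α)
    (hu : ∀ y ∈ u, before x y = false) :
    PySem.List.insertBy before x (u ++ v) = u ++ PySem.List.insertBy before x v := by
  induction u with
  | nil => simp
  | cons y u ih =>
      have hy : before x y = false := hu y (by simp)
      simp only [List.cons_append, PySem.List.insertBy, hy]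
      simp [ih (fun z hz => hu z (by simp [hz]))]

-- the insertion function used by PySem.List.sorted with key fontPrio
def insFont (acc : List (List (String × String))) (x : List (String × String)) :
    List (List (String × String)) :=
  PySem.List.insertBy (fun a b => decide (fontPrio a < fontPrio b)) x acc

-- one insertion appends x at the end of its priority bucket
lemma insFont_buckets (x : List (String × String)) (b1 b2 b3 b4 : List (List (String × String)))
    (h1 : ∀ f ∈ b1, fontPrio f = 1) (h2 : ∀ f ∈ b2, fontPrio f = 2)
    (h3 : ∀ f ∈ b3, fontPrio f = 3) (h4 : ∀ f ∈ b4, fontPrio f = 4) :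
    insFont (b1 ++ (b2 ++ (b3 ++ b4))) x =
      (if fontPrio x = 1 then b1 ++ [x] else b1) ++
      ((if fontPrio x = 2 then b2 ++ [x] else b2) ++
       ((if fontPrio x = 3 then b3 ++ [x] else b3) ++
        (if fontPrio x = 4 then b4 ++ [x] else b4))) := by
  unfold insFont
  have hfront : ∀ (v : List (List (String × String))), (∀ y ∈ v, fontPrio x < fontPrio y) →
      PySem.List.insertBy (fun a b => decide (fontPrio a < fontPrio b)) x v = x :: v := by
    intro v hv
    cases v with
    | nil => rfl
    | cons y ys => exact insertBy_cons_of_before _ _ _ _ (by simp [hv y (by simp)])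
  rcases fontPrio_cases x with hx | hx | hx | hx
  · rw [insertBy_append_of _ _ b1 _ (fun y hy => by simp [hx, h1 y hy]),
      hfront _ (by intro y hy; simp only [List.mem_append] at hy
                   rcases hy with hy | hy | hy
                   · rw [hx, h2 y hy]; norm_num
                   · rw [hx, h3 y hy]; norm_num
                   · rw [hx, h4 y hy]; norm_num)]
    simp [hx]
  · rw [show b1 ++ (b2 ++ (b3 ++ b4)) = (b1 ++ b2) ++ (b3 ++ b4) by simp,
      insertBy_append_of _ _ (b1 ++ b2) _ (fun y hy => by
        simp only [List.mem_append] at hy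
        rcases hy with hy | hy
        · simp [hx, h1 y hy]
        · simp [hx, h2 y hy]),
      hfront _ (by intro y hy; simp only [List.mem_append] at hy
                   rcases hy with hy | hy
                   · rw [hx, h3 y hy]; norm_num
                   · rw [hx, h4 y hy]; norm_num)]
    simp [hx]
  · rw [show b1 ++ (b2 ++ (b3 ++ b4)) = (b1 ++ b2 ++ b3) ++ b4 by simp,
      insertBy_append_of _ _ (b1 ++ b2 ++ b3) _ (fun y hy => by
        simp only [List.mem_append] at hy
        rcases hy with (hy | hy) | hy
        · simp [hx, h1 y hy]
        · simp [hx, h2 y hy]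
        · simp [hx, h3 y hy]),
      hfront _ (by intro y hy; rw [hx, h4 y hy]; norm_num)]
    simp [hx]
  · rw [show b1 ++ (b2 ++ (b3 ++ b4)) = (b1 ++ b2 ++ b3 ++ b4) ++ [] by simp,
      insertBy_append_of _ _ (b1 ++ b2 ++ b3 ++ b4) _ (fun y hy => by
        simp only [List.mem_append] at hy
        rcases hy with ((hy | hy) | hy) | hy
        · simp [hx, h1 y hy]
        · simp [hx, h2 y hy]
        · simp [hx, h3 y hy]
        · simp [hx, h4 y hy])]
    simp [hx, PySem.List.insertBy]

lemma foldl_insFont_buckets (xs : List (List (String × String)))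
    (b1 b2 b3 b4 : List (List (String × String)))
    (h1 : ∀ f ∈ b1, fontPrio f = 1) (h2 : ∀ f ∈ b2, fontPrio f = 2)
    (h3 : ∀ f ∈ b3, fontPrio f = 3) (h4 : ∀ f ∈ b4, fontPrio f = 4) :
    xs.foldl insFont (b1 ++ (b2 ++ (b3 ++ b4))) =
      (b1 ++ bkt 1 xs) ++ ((b2 ++ bkt 2 xs) ++ ((b3 ++ bkt 3 xs) ++ (b4 ++ bkt 4 xs))) := by
  induction xs generalizing b1 b2 b3 b4 with
  | nil => simp [bkt]
  | cons x xs ih =>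
      simp only [List.foldl_cons]
      rw [insFont_buckets x b1 b2 b3 b4 h1 h2 h3 h4]
      have hmem : ∀ (b : List (List (String × String))) (i : Int), (∀ f ∈ b, fontPrio f = i) →
          ∀ f ∈ (if fontPrio x = i then b ++ [x] else b), fontPrio f = i := by
        intro b i hb f hf
        split_ifs at hf with hxi
        · rcases List.mem_append.1 hf with hf | hf
          · exact hb f hf
          · simp only [List.mem_singleton] at hf; rw [hf, hxi]
        · exact hb f hf
      rw [ih _ _ _ _ (hmem b1 1 h1) (hmem b2 2 h2) (hmem b3 3 h3) (hmem b4 4 h4)]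
      have hb : ∀ (b : List (List (String × String))) (i : Int),
          (if fontPrio x = i then b ++ [x] else b) ++ bkt i xs = b ++ bkt i (x :: xs) := by
        intro b i
        by_cases hxi : fontPrio x = i
        · have : (fontPrio x == i) = true := by simp [hxi]
          simp [bkt, hxi]
        · have : (fontPrio x == i) = false := by simp [hxi]
          simp [bkt, hxi]
      rw [hb b1 1, hb b2 2, hb b3 3, hb b4 4]

lemma sorted_eq_buckets (fonts : List (List (String × String))) :
    PySem.List.sorted fonts (fun x => fontPrio x) =
      bkt 1 fonts ++ (bkt 2 fonts ++ (bkt 3 fonts ++ bkt 4 fonts)) := by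
  rw [PySem.List.sorted_eq_foldl_insertBy]
  have := foldl_insFont_buckets fonts [] [] [] [] (by simp) (by simp) (by simp) (by simp)
  simpa [insFont] using this

-- ===== VERDICT (by name: the statement is the Claim_ definition above) =====
theorem filter_unique_fonts_py_spec : Claim_equal_filter_unique_fonts_py := by
  intro fonts _ _
  unfold Spec_filter_unique_fonts_py filter_unique_fonts_py filter_unique_fonts_py_alt
  rw [sorted_eq_buckets, loopA_eq_stepA_fst]
  simp only [loopBLevels, loopBLevel_eq_stepA_filter]
  rw [stepA_append]
  set r1 := stepA (bkt 1 fonts) [] PySem.Set.empty with hr1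
  cases hbr1 : r1.2.2 with
  | true => simp
  | false =>
      simp only [Bool.false_eq_true, if_false]
      rw [stepA_append]
      set r2 := stepA (bkt 2 fonts) r1.1 r1.2.1 with hr2
      cases hbr2 : r2.2.2 with
      | true => simp
      | false =>
          simp only [Bool.false_eq_true, if_false]
          rw [stepA_append]
          set r3 := stepA (bkt 3 fonts) r2.1 r2.2.1 with hr3
          cases hbr3 : r3.2.2 with
          | true => simp
          | false =>
              simp only [Bool.false_eq_true, if_false]
              simp
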